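-- pv_equiv track=rewrite | github.com/wonjeongnam/programmers | 프로그래머스/1/76501. 음양 더하기/음양 더하기.py | solution
-- ===== SOURCE A (Python) =====
-- def solution(absolutes, signs):
--     sum = 0
--     for i, j in zip(absolutes, signs):
--         if j == True:
--             sum += i
--         else:
--             sum -= i
--     return sum
-- ===== SOURCE B (Python) =====
-- def solution(absolutes, signs):
--     total = sum(a for a, _ in zip(absolutes, signs))
--     neg = sum(a for a, s in zip(absolutes, signs) if s != True)
--     return total - 2 * neg
-- ===== Notes on version B (the rewrite author's own statement) =====
-- stated objective: alternative
-- what changed: Replaces A's single conditional accumulation loop with two unconditional passes: an unconditional total over the zipped pairs minus twice the sum of absolutes whose sign is False.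
import Mathlib
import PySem

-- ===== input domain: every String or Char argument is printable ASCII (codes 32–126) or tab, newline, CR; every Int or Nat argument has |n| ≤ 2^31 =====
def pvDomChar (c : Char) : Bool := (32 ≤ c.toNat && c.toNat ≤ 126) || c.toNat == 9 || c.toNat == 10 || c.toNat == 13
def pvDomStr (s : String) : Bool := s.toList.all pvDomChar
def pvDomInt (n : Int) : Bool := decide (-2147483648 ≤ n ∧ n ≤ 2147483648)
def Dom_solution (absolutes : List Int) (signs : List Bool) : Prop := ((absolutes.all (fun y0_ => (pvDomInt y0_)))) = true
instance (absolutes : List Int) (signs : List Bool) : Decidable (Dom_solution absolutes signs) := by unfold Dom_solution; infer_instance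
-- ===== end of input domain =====

-- B replaces A's conditional accumulation loop with two unconditional passes (total minus twice the False-signed sum); objective: alternative (same cost).
-- ===== PORT A =====
def solution (absolutes : List Int) (signs : List Bool) : Int :=
  (List.zip absolutes signs).foldl (fun sum ij => if ij.2 == true then sum + ij.1 else sum - ij.1) 0

-- ===== PORT B =====
-- B: unconditional total over the zipped pairs minus twice the sum of False-signed absolutes
def solution_alt (absolutes : List Int) (signs : List Bool) : Int :=
  let pairs := List.zip absolutes signs
  let total := (pairs.map (fun ij => ij.1)).sum
  let neg := ((pairs.filter (fun ij => ij.2 != true)).map (fun ij => ij.1)).sum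
  total - 2 * neg

-- ===== PRECONDITION & SPEC =====
def Spec_solution (absolutes : List Int) (signs : List Bool) (out : Int) : Prop := out = solution_alt absolutes signs
instance (absolutes : List Int) (signs : List Bool) (out : Int) : Decidable (Spec_solution absolutes signs out) := by unfold Spec_solution; infer_instance

-- ===== CLAIM (what is proved, stated in full; the proofs are below) =====
def Claim_equal_solution : Prop := ∀ (absolutes : List Int) (signs : List Bool), Dom_solution absolutes signs → Spec_solution absolutes signs (solution absolutes signs)

-- ===== LEMMAS AND PROOFS =====

-- ===== VERDICT (by name: the statement is the Claim_ definition above) =====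
lemma fold_eq (l : List (Int × Bool)) (acc : Int) :
    l.foldl (fun sum ij => if ij.2 == true then sum + ij.1 else sum - ij.1) acc
      = acc + (l.map (fun ij => ij.1)).sum
          - 2 * (((l.filter (fun ij => ij.2 != true)).map (fun ij => ij.1)).sum) := by
  induction l generalizing acc with
  | nil => simp
  | cons h t ih =>
    obtain ⟨a, s⟩ := h
    cases s <;> simp only [List.foldl_cons] <;> rw [ih] <;> simp <;> ring

theorem solution_spec : Claim_equal_solution := by
  intro absolutes signs _
  unfold Spec_solution solution solution_alt
  rw [fold_eq]
  ring
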